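-- pv_equiv track=rewrite | github.com/WojciechKusa/VoMBaT | pages/5_Custom_measures.py | rpn_to_latex
-- ===== SOURCE A (Python) =====
-- def rpn_to_latex(tokens: list):
--     # Create a stack to store operands
--     stack = []
--
--     # Iterate through the tokens
--     for token in tokens:
--         if token in ["+", "-", "*", "/", "^"]:
--             if token == "+":
--                 operand2 = stack.pop()
--                 operand1 = stack.pop()
--                 result = f"{operand1} + {operand2}"
--             elif token == "-":
--                 operand2 = stack.pop()
--                 operand1 = stack.pop()
--                 result = f"{operand1} - {operand2}"
--             elif token == "*":
--                 operand2 = stack.pop()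
--                 operand1 = stack.pop()
--                 result = f"{operand1} \cdot {operand2}"
--             elif token == "/":
--                 operand2 = stack.pop()
--                 operand1 = stack.pop()
--                 result = f"\\frac{{{operand1}}}{{{operand2}}}"
--             elif token == "^":
--                 operand2 = stack.pop()
--                 operand1 = stack.pop()
--                 result = f"{operand1} ^ {operand2}"
--             # Push the result onto the stack
--             stack.append(result)
--         else:
--             stack.append(token)
--
--     return stack[0]
-- ===== SOURCE B (Python) =====
-- _OPS = {"+", "-", "*", "/", "^"}
--
--
-- def _render(node):
--     # A plain token renders as itself; an (op, left, right) node dispatches on op.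
--     if isinstance(node, str):
--         return node
--     op, left, right = node
--     a = _render(left)
--     b = _render(right)
--     if op == "/":
--         return f"\\frac{{{a}}}{{{b}}}"
--     if op == "*":
--         return f"{a} \\cdot {b}"
--     return f"{a} {op} {b}"
--
--
-- def rpn_to_latex(tokens: list):
--     # Build an AST in one pass, then render it recursively.
--     stack = []
--     for token in tokens:
--         if token in _OPS:
--             right = stack.pop()
--             left = stack.pop()
--             stack.append((token, left, right))
--         else:
--             stack.append(token)
--     return _render(stack[0])
-- ===== Notes on version B (the rewrite author's own statement) =====
-- stated objective: alternative
-- what changed: B builds an AST of (op, left, right) nodes during the stack pass and produces the LaTeX only afterwards with a recursive renderer that dispatches on the operator (uniform 'a op b' for +,-,^), instead of A's immediate per-operator string formatting inside the loop.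
import Mathlib
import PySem

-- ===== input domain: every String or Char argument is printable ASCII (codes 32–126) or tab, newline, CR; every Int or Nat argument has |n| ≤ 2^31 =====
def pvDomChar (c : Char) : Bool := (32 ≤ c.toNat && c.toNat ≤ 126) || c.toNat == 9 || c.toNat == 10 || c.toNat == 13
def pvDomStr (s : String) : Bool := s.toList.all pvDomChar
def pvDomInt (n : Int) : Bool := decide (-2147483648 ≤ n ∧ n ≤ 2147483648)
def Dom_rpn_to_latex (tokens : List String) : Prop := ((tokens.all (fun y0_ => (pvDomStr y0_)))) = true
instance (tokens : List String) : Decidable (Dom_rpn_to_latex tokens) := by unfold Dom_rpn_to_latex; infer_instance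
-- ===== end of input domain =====

-- B builds an AST of operator nodes in the stack pass and renders it recursively afterwards,
-- instead of A's immediate per-operator string formatting inside the loop (alternative decomposition, same cost).


-- ===== PORT A =====
-- A's stack is kept top-first (Python appends/pops at the end); Python's stack[0] is the last
-- element here. On a pop of an underfull stack Python raises IndexError (excluded by Pre_);
-- the port leaves the stack unchanged there, a totality guard only.
def stepA (stack : List String) (token : String) : List String :=
  if token == "+" ∨ token == "-" ∨ token == "*" ∨ token == "/" ∨ token == "^" then
    match stack with
    | operand2 :: operand1 :: rest =>
      (if token == "+" then operand1 ++ " + " ++ operand2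
       else if token == "-" then operand1 ++ " - " ++ operand2
       else if token == "*" then operand1 ++ " \\cdot " ++ operand2
       else if token == "/" then "\\frac{" ++ operand1 ++ "}{" ++ operand2 ++ "}"
       else operand1 ++ " ^ " ++ operand2) :: rest
    | _ => stack
  else token :: stack

def rpn_to_latex (tokens : List String) : String :=
  ((tokens.foldl stepA []).getLast?).getD ""

-- ===== PORT B =====
inductive RNode : Type
  | leaf : String → RNode
  | node : String → RNode → RNode → RNode
deriving DecidableEq, Repr

def renderB : RNode → String
  | .leaf s => s
  | .node op left right =>
    let a := renderB left
    let b := renderB right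
    if op == "/" then "\\frac{" ++ a ++ "}{" ++ b ++ "}"
    else if op == "*" then a ++ " \\cdot " ++ b
    else a ++ " " ++ op ++ " " ++ b

-- same totality guard on underflow as in port A (outside Pre_)
def stepB (stack : List RNode) (token : String) : List RNode :=
  if token == "+" ∨ token == "-" ∨ token == "*" ∨ token == "/" ∨ token == "^" then
    match stack with
    | right :: left :: rest => RNode.node token left right :: rest
    | _ => stack
  else RNode.leaf token :: stack

def rpn_to_latex_alt (tokens : List String) : String :=
  (((tokens.foldl stepB []).getLast?).map renderB).getD ""

-- ===== PRECONDITION & SPEC =====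
-- Exactly the inputs where Python A returns: nonempty token list and, before every operator
-- token, the running operand balance (+1 per operand, -1 per operator) is at least 2, so no
-- pop raises IndexError and stack[0] exists.
def isOpTok (t : String) : Bool := t == "+" || t == "-" || t == "*" || t == "/" || t == "^"

def Pre_rpn_to_latex (tokens : List String) : Prop :=
  tokens ≠ [] ∧ ∀ i : Fin tokens.length, isOpTok tokens[i] →
    2 ≤ (tokens.take i).foldl (fun b t => if isOpTok t then b - 1 else b + 1) (0 : Int)
instance (tokens : List String) : Decidable (Pre_rpn_to_latex tokens) := by
  unfold Pre_rpn_to_latex; infer_instance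

def pvWitness_rpn_to_latex : List String := ["a", "b", "+"]

def Spec_rpn_to_latex (tokens : List String) (out : String) : Prop := out = rpn_to_latex_alt tokens
instance (tokens : List String) (out : String) : Decidable (Spec_rpn_to_latex tokens out) := by unfold Spec_rpn_to_latex; infer_instance

-- ===== CLAIM (what is proved, stated in full; the proofs are below) =====
def Claim_equal_rpn_to_latex : Prop := ∀ (tokens : List String), Dom_rpn_to_latex tokens → Pre_rpn_to_latex tokens → Spec_rpn_to_latex tokens (rpn_to_latex tokens)

-- ===== LEMMAS AND PROOFS =====

theorem stepA_map_render (stack : List RNode) (token : String) :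
    stepA (stack.map renderB) token = (stepB stack token).map renderB := by
  unfold stepA stepB
  by_cases h : token = "+" ∨ token = "-" ∨ token = "*" ∨ token = "/" ∨ token = "^"
  · simp only [beq_iff_eq, if_pos h]
    match stack with
    | [] => rfl
    | [x] => rfl
    | right :: left :: rest =>
      simp only [List.map_cons, renderB]
      rcases h with h | h | h | h | h <;> simp_all [String.append_assoc]
  · simp only [beq_iff_eq, if_neg h, List.map_cons, renderB]

theorem foldl_map_render (tokens : List String) (stack : List RNode) :
    tokens.foldl stepA (stack.map renderB) = (tokens.foldl stepB stack).map renderB := by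
  induction tokens generalizing stack with
  | nil => rfl
  | cons t ts ih =>
    simp only [List.foldl_cons, stepA_map_render]
    exact ih _

-- ===== VERDICT (by name: the statement is the Claim_ definition above) =====
theorem rpn_to_latex_spec : Claim_equal_rpn_to_latex := by
  intro tokens _ _
  unfold Spec_rpn_to_latex rpn_to_latex rpn_to_latex_alt
  have h := foldl_map_render tokens []
  simp only [List.map_nil] at h
  rw [h, List.getLast?_map]
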